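-- pv_equiv track=rewrite | github.com/oiueaieouaeuoauiaoei/adventofcode | 2019/22 – Slam Shuffle.py | compute_ab
-- ===== SOURCE A (Python) =====
-- def compute_ab(techniques, length):
-- 	# in search of the function f such that
-- 	# f(card_index) = card_index *a +b = card_number
-- 	# in the ring of integers modulo length
--
-- 	# we start with an identity function (the deck in factory order)
-- 	(a, b, ) = (1, 0, )
--
-- 	for (technique, amount, ) in techniques:
-- 		if "into" == technique:
-- 			a *= -1
-- 			b += a
-- 		elif "with" == technique:
-- 			# while you could get a “ValueError: base is not invertible for the given modulus”
-- 			# today’s puzzle tells you to assume an inverse element always exist, so let’s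
-- 			a *= pow(amount, -1, length)
-- 		elif "cut" == technique:
-- 			b += a *amount
-- 		else:
-- 			raise Exception((technique, amount, ))
--
-- 		a %= length
-- 		b %= length
--
-- 	return (a, b, )
-- ===== SOURCE B (Python) =====
-- def _mat(technique, amount, length):
--     # each shuffle technique as a 2x2 affine matrix acting on the row vector (a, b)
--     if technique == "into":
--         return ((-1, -1), (0, 1))
--     if technique == "with":
--         return ((pow(amount, -1, length), 0), (0, 1))
--     if technique == "cut":
--         return ((1, amount), (0, 1))
--     raise Exception((technique, amount,))
--
--
-- def _mulmod(m, P, Q):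
--     ((p00, p01), (p10, p11)) = P
--     ((q00, q01), (q10, q11)) = Q
--     return (((p00 * q00 + p01 * q10) % m, (p00 * q01 + p01 * q11) % m),
--             ((p10 * q00 + p11 * q10) % m, (p10 * q01 + p11 * q11) % m))
--
--
-- def compute_ab(techniques, length):
--     M = ((1, 0), (0, 1))
--     for (technique, amount) in techniques:
--         M = _mulmod(length, M, _mat(technique, amount, length))
--     return M[0]
-- ===== Notes on version B (the rewrite author's own statement) =====
-- stated objective: alternative
-- what changed: B represents every technique as a 2x2 affine matrix mod length and folds them by matrix multiplication starting from the identity, reading the answer off the composed matrix's top row, instead of A's hand-rolled per-technique updates of the scalar pair (a, b).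
import Mathlib
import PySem

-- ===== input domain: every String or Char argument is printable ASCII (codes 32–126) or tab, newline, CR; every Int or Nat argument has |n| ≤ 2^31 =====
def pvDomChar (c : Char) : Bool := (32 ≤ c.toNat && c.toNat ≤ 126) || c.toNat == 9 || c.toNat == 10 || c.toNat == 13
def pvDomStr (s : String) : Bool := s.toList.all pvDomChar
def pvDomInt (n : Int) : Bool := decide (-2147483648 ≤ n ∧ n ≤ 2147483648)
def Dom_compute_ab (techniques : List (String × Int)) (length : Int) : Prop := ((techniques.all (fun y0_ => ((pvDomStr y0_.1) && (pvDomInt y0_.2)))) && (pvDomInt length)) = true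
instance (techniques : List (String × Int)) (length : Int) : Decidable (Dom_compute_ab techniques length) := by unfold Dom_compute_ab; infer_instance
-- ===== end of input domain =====

-- B composes per-technique 2x2 affine matrices (mod length) instead of A's scalar (a, b) updates;
-- objective: alternative decomposition, same cost.


-- shared port of the builtin pow(a, -1, m): the canonical modular inverse, exact when
-- Int.gcd a m = 1 and m ≠ 0 (guaranteed by Pre_; arbitrary value otherwise, where Python raises)
def pyInvMod (a m : Int) : Int := PySem.Int.mod (Int.gcdA a m) m

-- ===== PORT A =====
-- loop body of A, one iteration: the three technique branches, then a %= length; b %= length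
def pvStepA (length : Int) (s : Int × Int) (t : String × Int) : Int × Int :=
  let ab :=
    if "into" = t.1 then
      let a := s.1 * (-1)
      (a, s.2 + a)
    else if "with" = t.1 then
      (s.1 * pyInvMod t.2 length, s.2)
    else if "cut" = t.1 then
      (s.1, s.2 + s.1 * t.2)
    else
      (s.1, s.2)  -- `raise Exception((technique, amount,))`: excluded by Pre_
  (PySem.Int.mod ab.1 length, PySem.Int.mod ab.2 length)

def compute_ab (techniques : List (String × Int)) (length : Int) : Int × Int :=
  techniques.foldl (pvStepA length) (1, 0)

-- ===== PORT B =====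
def pvMat (technique : String) (amount length : Int) : (Int × Int) × (Int × Int) :=
  if technique = "into" then ((-1, -1), (0, 1))
  else if technique = "with" then ((pyInvMod amount length, 0), (0, 1))
  else if technique = "cut" then ((1, amount), (0, 1))
  else ((1, 0), (0, 1))  -- `raise Exception((technique, amount,))`: excluded by Pre_

def pvMulMod (m : Int) (P Q : (Int × Int) × (Int × Int)) : (Int × Int) × (Int × Int) :=
  ((PySem.Int.mod (P.1.1 * Q.1.1 + P.1.2 * Q.2.1) m, PySem.Int.mod (P.1.1 * Q.1.2 + P.1.2 * Q.2.2) m),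
   (PySem.Int.mod (P.2.1 * Q.1.1 + P.2.2 * Q.2.1) m, PySem.Int.mod (P.2.1 * Q.1.2 + P.2.2 * Q.2.2) m))

def compute_ab_alt (techniques : List (String × Int)) (length : Int) : Int × Int :=
  (techniques.foldl
    (fun M t => pvMulMod length M (pvMat t.1 t.2 length))
    ((1, 0), (0, 1))).1

-- ===== PRECONDITION & SPEC =====
-- Pre_ = exactly the inputs on which Python A returns: length must be nonzero as soon as any
-- technique is processed (a %= length), every technique name must be known, and every "with"
-- amount must be invertible modulo length (else pow raises ValueError).
def Pre_compute_ab (techniques : List (String × Int)) (length : Int) : Prop :=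
  (techniques = [] ∨ length ≠ 0) ∧
  ∀ p ∈ techniques, p.1 = "into" ∨ p.1 = "cut" ∨ (p.1 = "with" ∧ Int.gcd p.2 length = 1)
instance (techniques : List (String × Int)) (length : Int) : Decidable (Pre_compute_ab techniques length) := by unfold Pre_compute_ab; infer_instance

def pvWitness_compute_ab : (List (String × Int)) × Int := ([("into", 0), ("cut", 3), ("with", 7)], 10)

def Spec_compute_ab (techniques : List (String × Int)) (length : Int) (out : Int × Int) : Prop := out = compute_ab_alt techniques length
instance (techniques : List (String × Int)) (length : Int) (out : Int × Int) : Decidable (Spec_compute_ab techniques length out) := by unfold Spec_compute_ab; infer_instance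

-- ===== CLAIM (what is proved, stated in full; the proofs are below) =====
def Claim_equal_compute_ab : Prop := ∀ (techniques : List (String × Int)) (length : Int), Dom_compute_ab techniques length → Pre_compute_ab techniques length → Spec_compute_ab techniques length (compute_ab techniques length)

-- ===== LEMMAS AND PROOFS =====

-- invariant: the top row of B's matrix accumulator is exactly A's state (a, b)
theorem step_top_row (length : Int) (M : (Int × Int) × (Int × Int)) (a b : Int)
    (h : M.1 = (a, b)) (t : String × Int) :
    (pvMulMod length M (pvMat t.1 t.2 length)).1 = pvStepA length (a, b) t := by
  by_cases h1 : t.1 = "into"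
  · simp [pvMulMod, pvMat, pvStepA, h, h1]; ring_nf
  · by_cases h2 : t.1 = "with"
    · simp [pvMulMod, pvMat, pvStepA, h, h2]
    · by_cases h3 : t.1 = "cut"
      · simp [pvMulMod, pvMat, pvStepA, h, h3]
        ring_nf
      · simp [pvMulMod, pvMat, pvStepA, h, h1, h2, h3,
          (show ¬("into" = t.1) from fun hh => h1 hh.symm),
          (show ¬("with" = t.1) from fun hh => h2 hh.symm),
          (show ¬("cut" = t.1) from fun hh => h3 hh.symm)]

theorem foldl_top_row (length : Int) (ts : List (String × Int)) :
    ∀ (M : (Int × Int) × (Int × Int)) (a b : Int), M.1 = (a, b) →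
      (ts.foldl (fun M t => pvMulMod length M (pvMat t.1 t.2 length)) M).1 =
      ts.foldl (pvStepA length) (a, b) := by
  induction ts with
  | nil => intro M a b h; simpa using h
  | cons t ts ih =>
    intro M a b h
    simp only [List.foldl_cons]
    exact ih _ _ _ (step_top_row length M a b h t)

-- ===== VERDICT (by name: the statement is the Claim_ definition above) =====
theorem compute_ab_spec : Claim_equal_compute_ab := by
  intro techniques length _ _
  unfold Spec_compute_ab compute_ab compute_ab_alt
  exact (foldl_top_row length techniques ((1, 0), (0, 1)) 1 0 rfl).symm
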